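-- pv_equiv track=rewrite | github.com/FilippoSimonazzi/Python_Projects | Numberphile/Monet.py | get_points
-- ===== SOURCE A (Python) =====
-- def get_sequence(sequence):
--     new_sequence = []
--     for i in range(len(sequence)):
--         new_sequence.append(sequence[i])
--         new_sequence.append(0)
--
--     new_sequence = new_sequence[:-1]
--     for i in range(len(new_sequence)):
--         if new_sequence[i] == 0:
--             new_sequence[i] = new_sequence[i-1] + new_sequence[i+1]
--
--     return new_sequence
--
-- def get_points(n_steps):
--     n = 0
--
--     final_sequence = [1]
--     sequence = [1,2,1]
--     while n <= n_steps:
--         if n == 0: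
--             initial_sequence = get_sequence([1,1])
--             final_sequence += initial_sequence[:-1]
--         else:
--             sequence = get_sequence(sequence)
--             final_sequence += sequence[:-1]
--         n += 1
--
--     return final_sequence
-- ===== SOURCE B (Python) =====
-- def get_points(n_steps):
--     # The concatenated mediant rows are exactly Stern's diatomic sequence
--     # s(1), s(2), ..., s(2**(n_steps+2) - 1), where s(2k) = s(k) and
--     # s(2k+1) = s(k) + s(k+1).  Compute it directly by that recurrence.
--     if n_steps < 0:
--         return [1]
--     m = 2 ** (n_steps + 2) - 1
--     s = [0, 1]
--     for i in range(2, m + 1):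
--         q, r = divmod(i, 2)
--         s.append(s[q] if r == 0 else s[q] + s[q + 1])
--     return s[1:m + 1]
-- ===== Notes on version B (the rewrite author's own statement) =====
-- stated objective: alternative
-- what changed: Replaces A's iterated mediant-row expansion (interleave zeros, fill them, concatenate rows) by a direct dynamic-programming computation of Stern's diatomic sequence via its recurrence s(2k)=s(k), s(2k+1)=s(k)+s(k+1), of which A's concatenated rows are exactly terms s(1)..s(2^(n_steps+2)-1); rows are never built.
import Mathlib
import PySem

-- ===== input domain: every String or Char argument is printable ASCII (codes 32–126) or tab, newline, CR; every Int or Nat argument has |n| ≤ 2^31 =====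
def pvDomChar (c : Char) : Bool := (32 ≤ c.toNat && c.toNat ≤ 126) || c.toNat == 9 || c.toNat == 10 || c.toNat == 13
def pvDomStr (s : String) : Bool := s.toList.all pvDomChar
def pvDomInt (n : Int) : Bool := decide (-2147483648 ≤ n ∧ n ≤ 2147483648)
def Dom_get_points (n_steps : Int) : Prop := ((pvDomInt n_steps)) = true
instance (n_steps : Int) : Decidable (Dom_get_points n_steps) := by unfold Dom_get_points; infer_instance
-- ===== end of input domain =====

-- B computes the same output as Stern's diatomic sequence s(1)..s(2^(n_steps+2)-1) by the
-- recurrence s(2k)=s(k), s(2k+1)=s(k)+s(k+1), instead of A's iterated mediant-row expansion.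

-- ===== PORT A =====
-- get_sequence: first loop appends sequence[i] and 0 for each i; then new_sequence[:-1];
-- second loop replaces each zero in place by the sum of its neighbours (new[i-1] + new[i+1],
-- Python indexing: i-1 may be -1 and wrap; indices ported with PySem.List.pyGetD/pySetD, exact in range).
def get_sequence (sequence : List Int) : List Int :=
  let new1 : List Int :=
    (List.range sequence.length).foldl
      (fun acc i => acc ++ [PySem.List.pyGetD sequence ((i : Nat) : Int) 0, 0]) []
  let new2 : List Int := PySem.List.slice new1 none (some (-1))
  (List.range new2.length).foldl
    (fun ns i =>
      if PySem.List.pyGetD ns ((i : Nat) : Int) 0 == 0 then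
        PySem.List.pySetD ns ((i : Nat) : Int)
          (PySem.List.pyGetD ns (((i : Nat) : Int) - 1) 0 + PySem.List.pyGetD ns (((i : Nat) : Int) + 1) 0)
      else ns) new2

-- A's while loop 'while n <= n_steps', n starting at 0: runs (n_steps+1).toNat times.
def gpLoopA : Nat → Int → List Int → List Int → List Int
  | 0, _, _, final => final
  | k + 1, n, seq, final =>
    if n == 0 then
      let initial := get_sequence [1, 1]
      gpLoopA k (n + 1) seq (final ++ PySem.List.slice initial none (some (-1)))
    else
      let seq' := get_sequence seq
      gpLoopA k (n + 1) seq' (final ++ PySem.List.slice seq' none (some (-1)))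

def get_points (n_steps : Int) : List Int :=
  gpLoopA (n_steps + 1).toNat 0 [1, 2, 1] [1]

-- ===== PORT B =====
-- Source B: if n_steps < 0 return [1]; else DP over the Stern recurrence, then s[1:m+1].
-- s[q] / s[q+1] are in range on every reached index; ported with pyGetD (exact in range).
def get_points_alt (n_steps : Int) : List Int :=
  if n_steps < 0 then [1]
  else
    let m : Int := 2 ^ (n_steps + 2).toNat - 1
    let s : List Int :=
      (PySem.List.pyRange 2 (m + 1) 1).foldl
        (fun s i =>
          let q := PySem.Int.floordiv i 2
          let r := PySem.Int.mod i 2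
          s ++ [if r == 0 then PySem.List.pyGetD s q 0
                else PySem.List.pyGetD s q 0 + PySem.List.pyGetD s (q + 1) 0])
        [0, 1]
    PySem.List.slice s (some 1) (some (m + 1))

-- ===== PRECONDITION & SPEC =====
def Spec_get_points (n_steps : Int) (out : List Int) : Prop := out = get_points_alt n_steps
instance (n_steps : Int) (out : List Int) : Decidable (Spec_get_points n_steps out) := by unfold Spec_get_points; infer_instance

-- ===== CLAIM (what is proved, stated in full; the proofs are below) =====
def Claim_equal_get_points : Prop := ∀ (n_steps : Int), Dom_get_points n_steps → Spec_get_points n_steps (get_points n_steps)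

-- ===== LEMMAS AND PROOFS =====

-- Stern's diatomic sequence
def stern : Nat → Int
  | 0 => 0
  | 1 => 1
  | n + 2 =>
    if (n + 2) % 2 = 0 then stern ((n + 2) / 2)
    else stern ((n + 2) / 2) + stern ((n + 2) / 2 + 1)
  decreasing_by all_goals omega

theorem stern_zero : stern 0 = 0 := by rw [stern]

theorem stern_one : stern 1 = 1 := by rw [stern]

theorem stern_two_mul (m : Nat) : stern (2 * m) = stern m := by
  match m with
  | 0 => rfl
  | k + 1 =>
    show stern (2 * k + 2) = _
    rw [stern]
    have h : (2 * k + 2) % 2 = 0 := by omega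
    rw [if_pos h]
    congr 1; omega

theorem stern_two_mul_add_one (m : Nat) : stern (2 * m + 1) = stern m + stern (m + 1) := by
  match m with
  | 0 => rw [show 2 * 0 + 1 = 1 by ring]; simp [stern_zero, stern_one]
  | k + 1 =>
    show stern (2 * k + 3) = _
    rw [show 2 * k + 3 = (2 * k + 1) + 2 by ring, stern]
    have h : ¬ (2 * k + 1 + 2) % 2 = 0 := by omega
    rw [if_neg h]
    have h1 : (2 * k + 1 + 2) / 2 = k + 1 := by omega
    rw [h1]

theorem stern_pos : ∀ m : Nat, 1 ≤ m → 0 < stern m := by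
  intro m
  induction m using Nat.strong_induction_on with
  | _ m ih =>
    intro hm
    match m, hm with
    | 1, _ => rw [stern_one]; norm_num
    | n + 2, _ =>
      rw [stern]
      split
      · exact ih ((n + 2) / 2) (by omega) (by omega)
      · have h1 := ih ((n + 2) / 2) (by omega) (by omega)
        have h2 := ih ((n + 2) / 2 + 1) (by omega) (by omega)
        omega

theorem stern_two : stern 2 = 1 := by
  rw [show (2:Nat) = 2 * 1 by ring, stern_two_mul, stern_one]

theorem stern_three : stern 3 = 2 := by
  rw [show (3:Nat) = 2 * 1 + 1 by ring, stern_two_mul_add_one]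
  norm_num [stern_one, stern_two]

theorem stern_four : stern 4 = 1 := by
  rw [show (4:Nat) = 2 * 2 by ring, stern_two_mul, stern_two]

-- the mediant expansion of a :: t, written as structural recursion
def eRow : Int → List Int → List Int
  | a, [] => [a]
  | a, b :: t => a :: (a + b) :: eRow b t

-- the zero-interleaved row a, 0, b, 0, ..., last
def interZ : Int → List Int → List Int
  | a, [] => [a]
  | a, b :: t => a :: 0 :: interZ b t

theorem interZ_length (a : Int) (t : List Int) : (interZ a t).length = 2 * t.length + 1 := by
  induction t generalizing a with
  | nil => rfl
  | cons b t ih => simp [interZ, ih b]; omega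

theorem flatMap_pair_eq_interZ (a : Int) (t : List Int) :
    (a :: t).flatMap (fun x => [x, 0]) = interZ a t ++ [0] := by
  induction t generalizing a with
  | nil => rfl
  | cons b t ih => simpa [interZ] using ih b

theorem pyGetD_shift (x : Int) (xs : List Int) (i : Nat) (d : Int) :
    PySem.List.pyGetD (x :: xs) ((i : Int) + 1) d = PySem.List.pyGetD xs (i : Int) d := by
  have h : ((i : Int) + 1) = ((i + 1 : Nat) : Int) := by push_cast; ring
  rw [h, PySem.List.pyGetD_natCast, PySem.List.pyGetD_natCast]
  simp [List.getD]

theorem pass1_aux (s : List Int) (acc : List Int) :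
    (List.range s.length).foldl (fun acc i => acc ++ [PySem.List.pyGetD s ((i : Nat) : Int) 0, 0]) acc
    = acc ++ s.flatMap (fun x => [x, 0]) := by
  induction s generalizing acc with
  | nil => simp
  | cons b t ih =>
    rw [List.length_cons, List.range_succ_eq_map, List.foldl_cons, List.foldl_map]
    have hfun : (fun (acc : List Int) (i : Nat) => acc ++ [PySem.List.pyGetD (b :: t) ((i.succ : Nat) : Int) 0, 0])
        = (fun (acc : List Int) (i : Nat) => acc ++ [PySem.List.pyGetD t ((i : Nat) : Int) 0, 0]) := by
      funext acc i
      have h : ((i.succ : Nat) : Int) = (i : Int) + 1 := by push_cast; ring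
      rw [h, pyGetD_shift]
    rw [hfun, ih]
    have hb0 : PySem.List.pyGetD (b :: t) ((0 : Nat) : Int) 0 = b := by
      simp
    rw [hb0]
    simp

-- one step of A's second pass, as a named function
def fixStep (ns : List Int) (i : Nat) : List Int :=
  if PySem.List.pyGetD ns ((i : Nat) : Int) 0 == 0 then
    PySem.List.pySetD ns ((i : Nat) : Int)
      (PySem.List.pyGetD ns (((i : Nat) : Int) - 1) 0 + PySem.List.pyGetD ns (((i : Nat) : Int) + 1) 0)
  else ns

theorem pass2_aux (t : List Int) (a : Int) (P : List Int) (ha : 0 < a) (ht : ∀ x ∈ t, 0 < x) :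
    (List.range' P.length (2 * t.length + 1)).foldl fixStep (P ++ interZ a t) = P ++ eRow a t := by
  induction t generalizing a P with
  | nil =>
    rw [List.range'_succ]
    show List.foldl fixStep (fixStep (P ++ [a]) P.length) (List.range' (P.length + 1) 0) = _
    have hget : PySem.List.pyGetD (P ++ [a]) ((P.length : Nat) : Int) 0 = a := by
      rw [PySem.List.pyGetD_natCast]
      simp [List.getD]
    simp only [fixStep, hget]
    rw [if_neg (by simp; omega)]
    simp [eRow]
  | cons b t ih =>
    have hb : 0 < b := ht b (by simp)
    have ht' : ∀ x ∈ t, 0 < x := fun x hx => ht x (by simp [hx])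
    have hlen : 2 * (b :: t).length + 1 = (2 * t.length + 1) + 1 + 1 := by simp; omega
    rw [hlen, List.range'_succ, List.range'_succ, List.foldl_cons, List.foldl_cons]
    have hL : P ++ interZ a (b :: t) = P ++ a :: 0 :: interZ b t := by simp [interZ]
    have hget1 : PySem.List.pyGetD (P ++ a :: 0 :: interZ b t) ((P.length : Nat) : Int) 0 = a := by
      rw [PySem.List.pyGetD_natCast]
      simp [List.getD]
    have hs1 : fixStep (P ++ a :: 0 :: interZ b t) P.length = P ++ a :: 0 :: interZ b t := by
      simp only [fixStep, hget1]
      rw [if_neg (by simp; omega)]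
    have hget2 : PySem.List.pyGetD (P ++ a :: 0 :: interZ b t) ((P.length + 1 : Nat) : Int) 0 = 0 := by
      rw [PySem.List.pyGetD_natCast]
      simp [List.getD]
    have hgetL : PySem.List.pyGetD (P ++ a :: 0 :: interZ b t) (((P.length + 1 : Nat) : Int) - 1) 0 = a := by
      have h : (((P.length + 1 : Nat) : Int) - 1) = ((P.length : Nat) : Int) := by push_cast; ring
      rw [h, PySem.List.pyGetD_natCast]
      simp [List.getD]
    have hheadI : ∃ u, interZ b t = b :: u := by cases t <;> exact ⟨_, rfl⟩
    obtain ⟨u, hu⟩ := hheadI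
    have hgetR : PySem.List.pyGetD (P ++ a :: 0 :: interZ b t) (((P.length + 1 : Nat) : Int) + 1) 0 = b := by
      have h : (((P.length + 1 : Nat) : Int) + 1) = ((P.length + 2 : Nat) : Int) := by push_cast; ring
      rw [h, PySem.List.pyGetD_natCast, hu]
      simp [List.getD]
    have hset : PySem.List.pySetD (P ++ a :: 0 :: interZ b t) ((P.length + 1 : Nat) : Int) (a + b)
        = (P ++ [a, a + b]) ++ interZ b t := by
      rw [PySem.List.pySetD_natCast]
      simp
    have hs2 : fixStep (P ++ a :: 0 :: interZ b t) (P.length + 1) = (P ++ [a, a + b]) ++ interZ b t := by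
      have hget2' : PySem.List.pyGetD (P ++ a :: 0 :: interZ b t) ((P.length : Int) + 1) 0 = 0 := by
        push_cast at hget2; exact hget2
      simp only [fixStep]
      rw [if_pos (by simp [hget2']), hgetL, hgetR, hset]
    rw [hL, hs1, hs2, show P.length + 1 + 1 = (P ++ [a, a + b]).length by simp,
        ih b (P ++ [a, a + b]) hb ht']
    simp [eRow]

theorem get_sequence_eq_eRow (a : Int) (t : List Int) (ha : 0 < a) (ht : ∀ x ∈ t, 0 < x) :
    get_sequence (a :: t) = eRow a t := by
  have hpass1 : (List.range (a :: t).length).foldl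
      (fun acc i => acc ++ [PySem.List.pyGetD (a :: t) ((i : Nat) : Int) 0, 0]) []
      = interZ a t ++ [0] := by
    rw [pass1_aux]; simpa using flatMap_pair_eq_interZ a t
  rw [get_sequence]
  rw [hpass1, PySem.List.slice_to_neg_one, List.dropLast_concat, interZ_length, List.range_eq_range']
  have h := pass2_aux t a [] ha ht
  rw [List.nil_append, List.length_nil] at h
  exact h

-- eRow on consecutive Stern values is the doubled block of Stern values
theorem eRow_stern (k m : Nat) :
    eRow (stern m) ((List.range' (m + 1) k).map stern)
      = (List.range' (2 * m) (2 * k + 1)).map stern := by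
  induction k generalizing m with
  | zero =>
    simp [eRow, List.range'_succ, stern_two_mul]
  | succ k ih =>
    rw [List.range'_succ, List.map_cons]
    show eRow (stern m) (stern (m + 1) :: _) = _
    rw [eRow]
    rw [show 2 * (k + 1) + 1 = (2 * k + 1) + 1 + 1 by ring,
        List.range'_succ, List.range'_succ, List.map_cons, List.map_cons]
    rw [show 2 * m + 1 + 1 = 2 * (m + 1) by ring, ih (m + 1)]
    rw [stern_two_mul, stern_two_mul_add_one]

def sternRow (k : Nat) : List Int := (List.range' (2 ^ k) (2 ^ k + 1)).map stern

theorem sternRow_cons (k : Nat) :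
    sternRow k = stern (2 ^ k) :: (List.range' (2 ^ k + 1) (2 ^ k)).map stern := by
  rw [sternRow, List.range'_succ, List.map_cons]

theorem sternRow_pos (k : Nat) : ∀ x ∈ sternRow k, 0 < x := by
  intro x hx
  rw [sternRow, List.mem_map] at hx
  obtain ⟨j, hj, rfl⟩ := hx
  rw [List.mem_range'] at hj
  exact stern_pos j (by have := Nat.one_le_two_pow (n := k); omega)

theorem get_sequence_sternRow (k : Nat) : get_sequence (sternRow k) = sternRow (k + 1) := by
  rw [sternRow_cons, get_sequence_eq_eRow _ _
      (by have := sternRow_pos k; rw [sternRow_cons] at this; exact this _ (by simp))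
      (by intro x hx; exact sternRow_pos k x (by rw [sternRow_cons]; simp [hx]))]
  rw [eRow_stern (2 ^ k) (2 ^ k)]
  rw [sternRow]
  congr 2 <;> ring

theorem sternRow_dropLast (k : Nat) :
    (sternRow k).dropLast = (List.range' (2 ^ k) (2 ^ k)).map stern := by
  rw [sternRow, show List.range' (2 ^ k) (2 ^ k + 1) = List.range' (2 ^ k) (2 ^ k) ++ [2 ^ k + 2 ^ k] from by
        rw [List.range'_1_concat], List.map_append]
  simp

theorem loopA_stern (j : Nat) : ∀ (k : Nat) (n : Int) (final : List Int), 1 ≤ n →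
    gpLoopA j n (sternRow k) final
      = final ++ (List.range' (2 ^ (k + 1)) (2 ^ (k + j + 1) - 2 ^ (k + 1))).map stern := by
  induction j with
  | zero =>
    intro k n final _
    simp [gpLoopA]
  | succ j ih =>
    intro k n final hn
    have hn' : (n == 0) = false := by simp; omega
    rw [gpLoopA]
    simp only [hn', Bool.false_eq_true, if_false]
    rw [get_sequence_sternRow, PySem.List.slice_to_neg_one, sternRow_dropLast,
        ih (k + 1) (n + 1) _ (by omega)]
    rw [List.append_assoc, ← List.map_append,
        show (2:Nat) ^ (k + 1 + 1) = 2 ^ (k + 1) + 2 ^ (k + 1) by ring,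
        List.range'_append_1]
    have hee : k + 1 + j + 1 = k + (j + 1) + 1 := by omega
    rw [hee]
    have h1 : 2 ^ (k + 1) + 2 ^ (k + 1) ≤ 2 ^ (k + (j + 1) + 1) := by
      calc 2 ^ (k + 1) + 2 ^ (k + 1) = 2 ^ (k + 1 + 1) := by ring
        _ ≤ 2 ^ (k + (j + 1) + 1) := Nat.pow_le_pow_right (by omega) (by omega)
    have hL : ∀ a b : Nat, a + a ≤ b → a + (b - (a + a)) = b - a := by
      intro a b h; omega
    rw [hL _ _ h1]

-- value of A on nonnegative input: stern over [1, 2^(k+2)-1] where k = n_steps.toNat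
theorem get_points_nonneg (k : Nat) :
    gpLoopA (k + 1) 0 [1, 2, 1] [1] = (List.range' 1 (2 ^ (k + 2) - 1)).map stern := by
  rw [gpLoopA]
  simp only [beq_self_eq_true, if_true]
  have h1 : get_sequence [1, 1] = [1, 2, 1] := by decide
  have h2 : PySem.List.slice ([1, 2, 1] : List Int) none (some (-1)) = [1, 2] := by decide
  rw [h1, h2]
  have h3 : ([1, 2, 1] : List Int) = sternRow 1 := by
    rw [sternRow, show List.range' (2 ^ 1) (2 ^ 1 + 1) = [2, 3, 4] by decide]
    simp [stern_two, stern_three, stern_four]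
  rw [h3, loopA_stern k 1 (0 + 1) ([1] ++ [1, 2]) (by omega)]
  have h4 : ([1] ++ [1, 2] : List Int) = (List.range' 1 3).map stern := by
    rw [show List.range' 1 3 = [1, 2, 3] by decide]
    simp [stern_one, stern_two, stern_three]
  rw [show ([1] : List Int) ++ [1, 2] ++ _ = ([1] ++ [1, 2]) ++ _ from rfl, h4, ← List.map_append]
  rw [show (2:Nat) ^ (1 + 1) = 1 + 3 from by norm_num, List.range'_append_1]
  have h6 : 1 + 3 ≤ 2 ^ (1 + k + 1) := by
    calc 1 + 3 = 2 ^ (1 + 1) := by norm_num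
      _ ≤ 2 ^ (1 + k + 1) := Nat.pow_le_pow_right (by omega) (by omega)
  have h7 : (2:Nat) ^ (1 + k + 1) = 2 ^ (k + 2) := by ring_nf
  rw [h7] at h6 ⊢
  have hL2 : ∀ b : Nat, 1 + 3 ≤ b → 3 + (b - (1 + 3)) = b - 1 := by
    intro b h; omega
  rw [hL2 _ h6]

-- B's DP fold produces stern 0 .. stern (j+1)
theorem b_fold (j : Nat) :
    (PySem.List.pyRange 2 ((j + 2 : Nat) : Int) 1).foldl
      (fun s i =>
        s ++ [if PySem.Int.mod i 2 == 0 then PySem.List.pyGetD s (PySem.Int.floordiv i 2) 0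
              else PySem.List.pyGetD s (PySem.Int.floordiv i 2) 0
                   + PySem.List.pyGetD s (PySem.Int.floordiv i 2 + 1) 0])
      [0, 1]
    = (List.range (j + 2)).map stern := by
  induction j with
  | zero =>
    rw [PySem.List.pyRange_one_eq_nil (by norm_num)]
    rw [show List.range (0 + 2) = [0, 1] by decide]
    simp [stern_zero, stern_one]
  | succ j ih =>
    rw [show ((j + 1 + 2 : Nat) : Int) = ((j + 2 : Nat) : Int) + 1 by push_cast; ring,
        PySem.List.pyRange_one_succ_right (by push_cast; omega), List.foldl_append, ih]
    rw [List.foldl_cons, List.foldl_nil]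
    have hq : PySem.Int.floordiv ((j + 2 : Nat) : Int) 2 = (((j + 2) / 2 : Nat) : Int) := by
      exact_mod_cast PySem.Int.floordiv_natCast (j + 2) 2
    have hr : PySem.Int.mod ((j + 2 : Nat) : Int) 2 = (((j + 2) % 2 : Nat) : Int) := by
      exact_mod_cast PySem.Int.mod_natCast (j + 2) 2
    simp only [hq, hr]
    have hget : ∀ (p : Nat), p < j + 2 →
        PySem.List.pyGetD ((List.range (j + 2)).map stern) ((p : Nat) : Int) 0 = stern p := by
      intro p hp
      rw [PySem.List.pyGetD_natCast, List.getD_eq_getElem _ _ (by simpa using hp)]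
      simp
    rcases Nat.mod_two_eq_zero_or_one (j + 2) with hr0 | hr1
    · -- even: j + 2 = 2 * ((j+2)/2)
      rw [hr0]
      simp only [Nat.cast_zero, beq_self_eq_true, if_true]
      rw [hget ((j + 2) / 2) (by omega)]
      rw [show List.range (j + 1 + 2) = List.range (j + 2) ++ [j + 2] from by
            rw [List.range_succ], List.map_append]
      congr 1
      have hv : stern (j + 2) = stern ((j + 2) / 2) := by
        conv_lhs => rw [show j + 2 = 2 * ((j + 2) / 2) by omega]
        rw [stern_two_mul]
      simp [hv]
    · -- odd
      rw [hr1]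
      have hne : ((((1 : Nat)) : Int) == 0) = false := by decide
      simp only [hne, Bool.false_eq_true, if_false]
      rw [hget ((j + 2) / 2) (by omega)]
      have hcast2 : (((j + 2) / 2 : Nat) : Int) + 1 = (((j + 2) / 2 + 1 : Nat) : Int) := by
        push_cast; ring
      rw [hcast2, hget ((j + 2) / 2 + 1) (by omega)]
      rw [show List.range (j + 1 + 2) = List.range (j + 2) ++ [j + 2] from by
            rw [List.range_succ], List.map_append]
      congr 1
      have hv : stern (j + 2) = stern ((j + 2) / 2) + stern ((j + 2) / 2 + 1) := by
        conv_lhs => rw [show j + 2 = 2 * ((j + 2) / 2) + 1 by omega]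
        rw [stern_two_mul_add_one]
      simp [hv]

-- dropping s[0] from the DP table: s[1 : N] of [stern 0, ..., stern (N-1)]
theorem stern_table_tail (N : Nat) :
    ((((List.range N).map stern).drop 1).take (N - 1)) = (List.range' 1 (N - 1)).map stern := by
  cases N with
  | zero => simp
  | succ N =>
    rw [List.range_eq_range', List.range'_succ, List.map_cons, List.drop_one, List.tail_cons]
    simp [List.take_of_length_le]

-- ===== VERDICT (by name: the statement is the Claim_ definition above) =====
theorem get_points_spec : Claim_equal_get_points := by
  intro n_steps _
  unfold Spec_get_points
  by_cases hneg : n_steps < 0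
  · simp only [get_points, get_points_alt, if_pos hneg]
    rw [show (n_steps + 1).toNat = 0 by omega]
    rfl
  · simp only [get_points, get_points_alt, if_neg hneg]
    set k : Nat := n_steps.toNat with hk
    have htn1 : (n_steps + 1).toNat = k + 1 := by omega
    have htn2 : (n_steps + 2).toNat = k + 2 := by omega
    rw [htn1, htn2, get_points_nonneg k]
    have hM4 : (4 : Nat) ≤ 2 ^ (k + 2) := by
      calc (4 : Nat) = 2 ^ 2 := by norm_num
        _ ≤ 2 ^ (k + 2) := Nat.pow_le_pow_right (by omega) (by omega)
    have hb1 : ((2 : Int) ^ (k + 2) - 1 + 1) = ((2 ^ (k + 2) : Nat) : Int) := by push_cast; ring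
    rw [hb1, show (2 : Nat) ^ (k + 2) = 2 ^ (k + 2) - 2 + 2 from by omega]
    rw [b_fold (2 ^ (k + 2) - 2)]
    rw [show (1 : Int) = ((1 : Nat) : Int) from by norm_num, PySem.List.slice_natCast]
    rw [stern_table_tail]
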